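-- pv_equiv track=rewrite | github.com/ianmoonee/WRScripts | ccn-api/hashes_generator/ccn_updater.py | group_paths_by_directory
-- ===== SOURCE A (Python) =====
-- def _has_code_files(filenames):
--     """Return True if any filename looks like test-procedure/test-logic code
--     (tl_*/tp_*), which distinguishes 'code' directories from auxiliary ones
--     (Makefiles, config/cdf/vm/ldra/vpx files, etc.)."""
--     for name in filenames:
--         base = name.rsplit("/", 1)[-1]
--         if base.startswith("tl_") or base.startswith("tp_"):
--             return True
--     return False
--
-- def _classify_dirs(dir_to_filenames):
--     """Split directories into (aux_dirs, code_dirs), each sorted alphabetically.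
--
--     A directory is classified as 'code' if it either contains tl_*/tp_* files
--     directly or is an ancestor of a directory that does (so higher-level
--     Makefile-only folders travel with the code they belong to).  Everything
--     else is 'aux' (cdf/, ldra/, vpx*/, vm/, hv/, etc.).
--     """
--     code_dirs = set()
--     for d, filenames in dir_to_filenames.items():
--         if _has_code_files(filenames):
--             code_dirs.add(d)
--     # Promote ancestors of code directories into the code tier.
--     for d in list(dir_to_filenames.keys()):
--         if d in code_dirs:
--             continue
--         prefix = d + "/" if d else ""
--         for cd in list(code_dirs):
--             if prefix and cd.startswith(prefix):
--                 code_dirs.add(d)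
--                 break
--
--     aux = sorted(d for d in dir_to_filenames if d not in code_dirs)
--     code = sorted(d for d in dir_to_filenames if d in code_dirs)
--     return aux, code
--
-- def group_paths_by_directory(paths):
--     """Group shortened paths by directory, keeping full dir/file on each line.
--
--     Files in the same directory are listed together (sorted); different
--     directories are separated by a blank line.  No standalone directory
--     header is printed — the directory prefix stays on each line.
--
--     Directory groups are ordered so that auxiliary directories (cdf/, ldra/,
--     vpx*/, vm/, hv/, etc.) come first, followed by code directories
--     (those containing tl_*/tp_* files) together with their higher-level
--     Makefile-only ancestors.  Within each tier, directories are sorted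
--     alphabetically.
--     """
--     from collections import OrderedDict
--     groups = OrderedDict()
--     filenames_by_dir = {}
--     for short_path in paths:
--         normalized = short_path.replace("\\", "/")
--         parts = normalized.rsplit("/", 1)
--         if len(parts) == 2:
--             directory, filename = parts
--         else:
--             directory, filename = "", parts[0]
--         groups.setdefault(directory, []).append(normalized)
--         filenames_by_dir.setdefault(directory, []).append(filename)
--
--     aux_dirs, code_dirs = _classify_dirs(filenames_by_dir)
--
--     blocks = []
--     for directory in aux_dirs + code_dirs:
--         lines = sorted(groups[directory])
--         blocks.append("\n".join(lines))
--     return "\n\n".join(blocks)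
-- ===== SOURCE B (Python) =====
-- def group_paths_by_directory(paths):
--     groups = {}
--     direct = set()
--     for p in paths:
--         n = p.replace("\\", "/")
--         d, _, f = n.rpartition("/")
--         groups.setdefault(d, []).append(n)
--         if f.startswith("tl_") or f.startswith("tp_"):
--             direct.add(d)
--     # promote ancestors: scan each code dir's own prefixes instead of all dir pairs
--     code = set(direct)
--     for cd in direct:
--         for i, ch in enumerate(cd):
--             if ch == "/":
--                 anc = cd[:i]
--                 if anc and anc in groups:
--                     code.add(anc)
--     ordered = sorted(groups)
--     ordered = [d for d in ordered if d not in code] + [d for d in ordered if d in code]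
--     return "\n\n".join("\n".join(sorted(groups[d])) for d in ordered)
-- ===== Notes on version B (the rewrite author's own statement) =====
-- stated objective: alternative
-- what changed: B detects tl_/tp_ files during the single grouping pass (no second filenames dict and no per-directory rescan), promotes ancestors by scanning each code directory's own prefix positions against the dir index instead of testing every directory against every code directory, and sorts the directory list once, stably partitioning it into aux ++ code.
import Mathlib
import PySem

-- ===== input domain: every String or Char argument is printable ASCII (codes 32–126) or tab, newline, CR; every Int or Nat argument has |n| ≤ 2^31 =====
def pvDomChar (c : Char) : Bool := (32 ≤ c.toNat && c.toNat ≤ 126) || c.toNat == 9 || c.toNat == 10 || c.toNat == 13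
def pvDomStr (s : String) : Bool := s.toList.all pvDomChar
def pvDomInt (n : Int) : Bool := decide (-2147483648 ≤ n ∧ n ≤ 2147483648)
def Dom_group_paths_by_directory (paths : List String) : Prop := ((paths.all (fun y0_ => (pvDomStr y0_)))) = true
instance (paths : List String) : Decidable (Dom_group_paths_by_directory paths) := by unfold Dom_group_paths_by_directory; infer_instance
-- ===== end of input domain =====

-- B (alternative algorithm): code files are detected during the single grouping
-- pass, ancestors are promoted by scanning each code directory's own prefix
-- positions instead of comparing every directory pair, and the directory list is
-- sorted once and stably partitioned into aux ++ code.

-- ===== PORT A =====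
-- s.rsplit("/", 1): hand port (PySem has no rsplit); exact for this separator and maxsplit
def pvRsplit1 (s : String) : List String :=
  let rev := s.toList.reverse
  if rev.any (fun c => c == '/') then
    [String.ofList ((rev.dropWhile (fun c => c != '/')).tail.reverse),
     String.ofList ((rev.takeWhile (fun c => c != '/')).reverse)]
  else [s]

def pvHasCodeFiles (filenames : List String) : Bool :=
  -- loop with early return = any
  filenames.any (fun name =>
    let base := PySem.List.pyGetD (pvRsplit1 name) (-1) ""
    PySem.Str.startswith base "tl_" || PySem.Str.startswith base "tp_")

def pvClassifyDirs (d2f : PySem.Dict String (List String)) : List String × List String :=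
  let code0 := d2f.items.foldl
    (fun s p => if pvHasCodeFiles p.2 then PySem.Set.add s p.1 else s) PySem.Set.empty
  -- 'for cd in list(code_dirs): … break' only decides existence, so it is
  -- order-independent and ported as .any over the set
  let codeS := d2f.keys.foldl
    (fun code d =>
      if PySem.Set.contains code d then code
      else
        let pfx := if d ≠ "" then d ++ "/" else ""
        if code.any (fun cd => decide (pfx ≠ "") && PySem.Str.startswith cd pfx) then
          PySem.Set.add code d
        else code) code0
  (PySem.List.sorted (d2f.keys.filter (fun d => !PySem.Set.contains codeS d)) (fun x => x) false,
   PySem.List.sorted (d2f.keys.filter (fun d => PySem.Set.contains codeS d)) (fun x => x) false)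

def group_paths_by_directory (paths : List String) : String :=
  let st := paths.foldl
    (fun (st : PySem.Dict String (List String) × PySem.Dict String (List String)) short_path =>
      let normalized := PySem.Str.replace short_path "\\" "/"
      let parts := pvRsplit1 normalized
      let df := if parts.length = 2 then (PySem.List.pyGetD parts 0 "", PySem.List.pyGetD parts 1 "")
                else ("", PySem.List.pyGetD parts 0 "")
      (st.1.modify df.1 [] (fun l => l ++ [normalized]),
       st.2.modify df.1 [] (fun l => l ++ [df.2])))
    (PySem.Dict.empty, PySem.Dict.empty)
  let ac := pvClassifyDirs st.2
  let blocks := (ac.1 ++ ac.2).foldl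
    (fun blocks d =>
      blocks ++ [PySem.Str.join "\n" (PySem.List.sorted (st.1.getD d []) (fun x => x) false)]) []
  PySem.Str.join "\n\n" blocks

-- ===== PORT B =====
-- s.rpartition("/"): hand port (PySem has no rpartition); exact for this one-char separator
def pvRpartition (s : String) : String × String × String :=
  let rev := s.toList.reverse
  let rest := rev.dropWhile (fun c => c != '/')
  if rest.isEmpty then ("", "", s)
  else (String.ofList rest.tail.reverse, "/", String.ofList ((rev.takeWhile (fun c => c != '/')).reverse))

def group_paths_by_directory_alt (paths : List String) : String :=
  let st := paths.foldl
    (fun (st : PySem.Dict String (List String) × PySem.Set String) p =>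
      let n := PySem.Str.replace p "\\" "/"
      let dpf := pvRpartition n
      (st.1.modify dpf.1 [] (fun l => l ++ [n]),
       if PySem.Str.startswith dpf.2.2 "tl_" || PySem.Str.startswith dpf.2.2 "tp_" then
         PySem.Set.add st.2 dpf.1
       else st.2))
    (PySem.Dict.empty, PySem.Set.empty)
  let groups := st.1
  let code := st.2.foldl
    (fun code cd =>
      (PySem.List.enumerate cd.toList 0).foldl
        (fun code ic =>
          if ic.2 == '/' then
            let anc := PySem.Str.slice cd none (some ic.1)
            if decide (anc ≠ "") && groups.contains anc then PySem.Set.add code anc else code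
          else code) code)
    (PySem.Set.ofList st.2)
  let ordered := PySem.List.sorted groups.keys (fun x => x) false
  let ordered2 := (ordered.filter (fun d => !PySem.Set.contains code d))
                  ++ (ordered.filter (fun d => PySem.Set.contains code d))
  PySem.Str.join "\n\n"
    (ordered2.map (fun d => PySem.Str.join "\n" (PySem.List.sorted (groups.getD d []) (fun x => x) false)))

-- ===== PRECONDITION & SPEC =====
def Spec_group_paths_by_directory (paths : List String) (out : String) : Prop := out = group_paths_by_directory_alt paths
instance (paths : List String) (out : String) : Decidable (Spec_group_paths_by_directory paths out) := by unfold Spec_group_paths_by_directory; infer_instance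

-- ===== CLAIM (what is proved, stated in full; the proofs are below) =====
def Claim_equal_group_paths_by_directory : Prop := ∀ (paths : List String), Dom_group_paths_by_directory paths → Spec_group_paths_by_directory paths (group_paths_by_directory paths)

-- ===== LEMMAS AND PROOFS =====

-- canonical split of a normalized path: shared vocabulary of the proofs
def pvNrm (p : String) : String := PySem.Str.replace p "\\" "/"
def pvDir (n : String) : String := (pvRpartition n).1
def pvFile (n : String) : String := (pvRpartition n).2.2
def pvMatch (f : String) : Bool := PySem.Str.startswith f "tl_" || PySem.Str.startswith f "tp_"
def pvGroups (paths : List String) : PySem.Dict String (List String) :=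
  paths.foldl (fun g p => g.modify (pvDir (pvNrm p)) [] (fun l => l ++ [pvNrm p])) PySem.Dict.empty
def pvFB (paths : List String) : PySem.Dict String (List String) :=
  paths.foldl (fun g p => g.modify (pvDir (pvNrm p)) [] (fun l => l ++ [pvFile (pvNrm p)])) PySem.Dict.empty
def pvDirect (paths : List String) : PySem.Set String :=
  paths.foldl (fun s p => if pvMatch (pvFile (pvNrm p)) then PySem.Set.add s (pvDir (pvNrm p)) else s)
    PySem.Set.empty
-- "some path has this dir and a tl_/tp_ file": what both direct-code computations answer
def pvCond (paths : List String) (x : String) : Prop :=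
  ∃ p ∈ paths, pvMatch (pvFile (pvNrm p)) = true ∧ pvDir (pvNrm p) = x

-- string basics
theorem pv_empty_iff (s : String) : s = "" ↔ s.toList = [] := by
  constructor
  · intro h; subst h; decide
  · intro h; rw [← String.ofList_toList (s := s), h]

theorem pv_slash_toList : ("/" : String).toList = ['/'] := by decide

theorem pv_append_slash_toList (d : String) : (d ++ "/").toList = d.toList ++ ['/'] := by
  rw [String.toList_append, pv_slash_toList]

theorem pv_append_slash_ne (d : String) : d ++ "/" ≠ "" := by
  intro h
  rw [pv_empty_iff, pv_append_slash_toList] at h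
  simp at h

theorem pv_sw_iff (cd p : String) :
    PySem.Str.startswith cd p = true ↔ p.toList <+: cd.toList := by
  unfold PySem.Str.startswith
  exact PySem.Chars.startswith_iff _ _

theorem pv_contains_iff {x : String} {s : PySem.Set String} :
    PySem.Set.contains s x = true ↔ x ∈ s := by
  simp [PySem.Set.contains]

-- the two hand-ported split helpers agree
theorem pv_df_eq (n : String) :
    (if (pvRsplit1 n).length = 2 then
       (PySem.List.pyGetD (pvRsplit1 n) 0 "", PySem.List.pyGetD (pvRsplit1 n) 1 "")
     else ("", PySem.List.pyGetD (pvRsplit1 n) 0 "")) = (pvDir n, pvFile n) := by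
  unfold pvRsplit1 pvDir pvFile pvRpartition
  by_cases h : n.toList.reverse.any (fun c => c == '/') = true
  · have hrest : (n.toList.reverse.dropWhile (fun c => c != '/')).isEmpty = false := by
      obtain ⟨x, hx, hx'⟩ := List.any_eq_true.mp h
      simp only [beq_iff_eq] at hx'
      simp only [List.isEmpty_eq_false_iff, ne_eq, List.dropWhile_eq_nil_iff]
      push Not
      exact ⟨x, hx, by simp [hx']⟩
    simp [h, hrest, PySem.List.pyGetD, PySem.List.pyGet?, PySem.List.pyIdx?]
  · have hrest : (n.toList.reverse.dropWhile (fun c => c != '/')).isEmpty = true := by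
      simp only [List.any_eq_true] at h
      push Not at h
      simp only [List.isEmpty_iff, List.dropWhile_eq_nil_iff]
      intro x hx
      simpa using h x hx
    simp [h, hrest, PySem.List.pyGetD, PySem.List.pyGet?, PySem.List.pyIdx?]

theorem pv_noslash_file (n : String) : '/' ∉ (pvFile n).toList := by
  unfold pvFile pvRpartition
  by_cases h : ((n.toList.reverse.dropWhile (fun c => c != '/')).isEmpty : Bool) = true
  · simp only [h, if_pos]
    intro hmem
    rw [List.isEmpty_iff, List.dropWhile_eq_nil_iff] at h
    have h2 := h '/' (List.mem_reverse.mpr hmem)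
    simp at h2
  · simp only [eq_false h, if_false, String.toList_ofList]
    intro hmem
    rw [List.mem_reverse] at hmem
    have h2 := List.mem_takeWhile_imp hmem
    simp at h2

theorem pv_rsplit_noslash (f : String) (h : '/' ∉ f.toList) :
    PySem.List.pyGetD (pvRsplit1 f) (-1) "" = f := by
  have hany : (f.toList.reverse.any (fun c => c == '/')) = false := by
    rw [List.any_eq_false]
    intro x hx
    rw [List.mem_reverse] at hx
    simp only [beq_iff_eq]
    intro hc; exact h (hc ▸ hx)
  unfold pvRsplit1
  simp [hany, PySem.List.pyGetD, PySem.List.pyGet?, PySem.List.pyIdx?]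

-- generic fold lemmas
theorem pv_mem_foldl_condAdd {α β : Type} [BEq α] [LawfulBEq α]
    (l : List β) (c : β → Bool) (g : β → α) (s : PySem.Set α) (y : α) :
    y ∈ l.foldl (fun s b => if c b then PySem.Set.add s (g b) else s) s
      ↔ y ∈ s ∨ ∃ b ∈ l, c b = true ∧ y = g b := by
  induction l generalizing s with
  | nil => simp
  | cons x xs ih =>
    simp only [List.foldl_cons, ih]
    by_cases h : c x = true
    · simp only [h, if_pos, PySem.Set.mem_add, List.mem_cons]
      constructor
      · rintro ((hs | rfl) | ⟨b, hb, hc, rfl⟩)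
        · exact Or.inl hs
        · exact Or.inr ⟨x, Or.inl rfl, h, rfl⟩
        · exact Or.inr ⟨b, Or.inr hb, hc, rfl⟩
      · rintro (hs | ⟨b, (rfl | hb), hc, rfl⟩)
        · exact Or.inl (Or.inl hs)
        · exact Or.inl (Or.inr rfl)
        · exact Or.inr ⟨b, hb, hc, rfl⟩
    · simp only [h, if_neg, Bool.false_eq_true, not_false_iff, List.mem_cons]
      constructor
      · rintro (hs | ⟨b, hb, hc, rfl⟩)
        · exact Or.inl hs
        · exact Or.inr ⟨b, Or.inr hb, hc, rfl⟩
      · rintro (hs | ⟨b, (rfl | hb), hc, rfl⟩)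
        · exact Or.inl hs
        · exact absurd hc h
        · exact Or.inr ⟨b, hb, hc, rfl⟩

theorem pv_mem_foldl_step {α β : Type} (l : List β) (step : PySem.Set α → β → PySem.Set α)
    (P : β → α → Prop) (h : ∀ s b y, y ∈ step s b ↔ y ∈ s ∨ P b y) :
    ∀ (s : PySem.Set α) (y : α), y ∈ l.foldl step s ↔ y ∈ s ∨ ∃ b ∈ l, P b y := by
  induction l with
  | nil => simp
  | cons x xs ih =>
    intro s y
    simp only [List.foldl_cons, ih, h, List.mem_cons]
    constructor
    · rintro ((hs | hp) | ⟨b, hb, hp⟩)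
      · exact Or.inl hs
      · exact Or.inr ⟨x, Or.inl rfl, hp⟩
      · exact Or.inr ⟨b, Or.inr hb, hp⟩
    · rintro (hs | ⟨b, (rfl | hb), hp⟩)
      · exact Or.inl (Or.inl hs)
      · exact Or.inl (Or.inr hp)
      · exact Or.inr ⟨b, hb, hp⟩

-- prefix-with-slash ↔ character position
theorem pv_prefix_slash (x cd : List Char) :
    x ++ ['/'] <+: cd ↔ ∃ k, ∃ h : k < cd.length, cd[k] = '/' ∧ x = cd.take k := by
  constructor
  · rintro ⟨t, ht⟩
    have ht' : x ++ '/' :: t = cd := by simpa using ht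
    have hlen : x.length < cd.length := by
      rw [← ht']; simp
    refine ⟨x.length, hlen, ?_, ?_⟩
    · subst ht'
      simp
    · rw [← ht']
      simp [List.take_left']
  · rintro ⟨k, h, hc, rfl⟩
    have hconcat : cd.take (k + 1) = cd.take k ++ [cd[k]] := by
      rw [List.take_add_one]
      simp [List.getElem?_eq_getElem h]
    rw [← hc, ← hconcat]
    exact List.take_prefix _ _

-- the stability of the inner 'for cd in code_dirs' test under promotion
theorem pv_test_stable (C₀ S : PySem.Set String)
    (hC : ∀ x ∈ C₀, x ∈ S)
    (hS : ∀ x ∈ S, x ∈ C₀ ∨ (x ≠ "" ∧ ∃ cd ∈ C₀, PySem.Str.startswith cd (x ++ "/") = true))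
    (p : String) :
    (S.any (fun cd => decide (p ≠ "") && PySem.Str.startswith cd p) = true)
      ↔ (p ≠ "" ∧ ∃ cd ∈ C₀, PySem.Str.startswith cd p = true) := by
  rw [List.any_eq_true]
  constructor
  · rintro ⟨cd, hcd, hb⟩
    rw [Bool.and_eq_true, decide_eq_true_eq] at hb
    obtain ⟨hp, hsw⟩ := hb
    refine ⟨hp, ?_⟩
    rcases hS cd hcd with h0 | ⟨hne, cd', hcd', hsw'⟩
    · exact ⟨cd, h0, hsw⟩
    · refine ⟨cd', hcd', ?_⟩
      rw [pv_sw_iff] at hsw hsw' ⊢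
      rw [pv_append_slash_toList] at hsw'
      exact hsw.trans ((List.prefix_append cd.toList ['/']).trans hsw')
  · rintro ⟨hp, cd, hcd, hsw⟩
    refine ⟨cd, hC cd hcd, ?_⟩
    rw [Bool.and_eq_true, decide_eq_true_eq]
    exact ⟨hp, hsw⟩

-- the promotion fold of A: membership characterization
theorem pv_promo_mem (K : List String) (C₀ : PySem.Set String) :
    ∀ (S : PySem.Set String),
      (∀ x ∈ C₀, x ∈ S) →
      (∀ x ∈ S, x ∈ C₀ ∨ (x ≠ "" ∧ ∃ cd ∈ C₀, PySem.Str.startswith cd (x ++ "/") = true)) →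
      ∀ y, (y ∈ K.foldl
        (fun code d =>
          if PySem.Set.contains code d then code
          else
            let pfx := if d ≠ "" then d ++ "/" else ""
            if code.any (fun cd => decide (pfx ≠ "") && PySem.Str.startswith cd pfx) then
              PySem.Set.add code d
            else code) S
        ↔ y ∈ S ∨ (y ∈ K ∧ y ≠ "" ∧ ∃ cd ∈ C₀, PySem.Str.startswith cd (y ++ "/") = true)) := by
  induction K with
  | nil => intro S hC hS y; simp
  | cons d K' ih =>
    intro S hC hS y
    simp only [List.foldl_cons, List.mem_cons]
    by_cases hcont : PySem.Set.contains S d = true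
    · have hmem : d ∈ S := pv_contains_iff.mp hcont
      have hstep : (if PySem.Set.contains S d then S
          else
            let pfx := if d ≠ "" then d ++ "/" else ""
            if S.any (fun cd => decide (pfx ≠ "") && PySem.Str.startswith cd pfx) then
              PySem.Set.add S d
            else S) = S := by rw [if_pos hcont]
      rw [hstep, ih S hC hS y]
      constructor
      · rintro (hs | ⟨hK, hQ⟩)
        · exact Or.inl hs
        · exact Or.inr ⟨Or.inr hK, hQ⟩
      · rintro (hs | ⟨(rfl | hK), hQ⟩)
        · exact Or.inl hs
        · exact Or.inl hmem
        · exact Or.inr ⟨hK, hQ⟩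
    · by_cases hd : d = ""
      · have hstep : (if PySem.Set.contains S d then S
            else
              let pfx := if d ≠ "" then d ++ "/" else ""
              if S.any (fun cd => decide (pfx ≠ "") && PySem.Str.startswith cd pfx) then
                PySem.Set.add S d
              else S) = S := by
          simp [hd]
        rw [hstep, ih S hC hS y]
        constructor
        · rintro (hs | ⟨hK, hQ⟩)
          · exact Or.inl hs
          · exact Or.inr ⟨Or.inr hK, hQ⟩
        · rintro (hs | ⟨(rfl | hK), hQ⟩)
          · exact Or.inl hs
          · exact absurd hd (by tauto)
          · exact Or.inr ⟨hK, hQ⟩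
      · by_cases ht : ∃ cd ∈ C₀, PySem.Str.startswith cd (d ++ "/") = true
        · have hany : S.any (fun cd => decide ((d ++ "/") ≠ "") && PySem.Str.startswith cd (d ++ "/")) = true :=
            (pv_test_stable C₀ S hC hS (d ++ "/")).mpr ⟨pv_append_slash_ne d, ht⟩
          have hstep : (if PySem.Set.contains S d then S
              else
                let pfx := if d ≠ "" then d ++ "/" else ""
                if S.any (fun cd => decide (pfx ≠ "") && PySem.Str.startswith cd pfx) then
                  PySem.Set.add S d
                else S) = PySem.Set.add S d := by
            simp only [hcont, Bool.false_eq_true, if_false, hd, ne_eq, not_false_iff, if_true, hany]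
          rw [hstep]
          have hC' : ∀ x ∈ C₀, x ∈ PySem.Set.add S d :=
            fun x hx => (PySem.Set.mem_add S d x).mpr (Or.inl (hC x hx))
          have hS' : ∀ x ∈ PySem.Set.add S d,
              x ∈ C₀ ∨ (x ≠ "" ∧ ∃ cd ∈ C₀, PySem.Str.startswith cd (x ++ "/") = true) := by
            intro x hx
            rcases (PySem.Set.mem_add S d x).mp hx with hx' | rfl
            · exact hS x hx'
            · exact Or.inr ⟨hd, ht⟩
          rw [ih (PySem.Set.add S d) hC' hS' y]
          simp only [PySem.Set.mem_add]
          constructor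
          · rintro ((hs | rfl) | ⟨hK, hQ⟩)
            · exact Or.inl hs
            · exact Or.inr ⟨Or.inl rfl, hd, ht⟩
            · exact Or.inr ⟨Or.inr hK, hQ⟩
          · rintro (hs | ⟨(rfl | hK), hQ⟩)
            · exact Or.inl (Or.inl hs)
            · exact Or.inl (Or.inr rfl)
            · exact Or.inr ⟨hK, hQ⟩
        · have hany : S.any (fun cd => decide ((d ++ "/") ≠ "") && PySem.Str.startswith cd (d ++ "/")) = false := by
            rw [← Bool.not_eq_true, pv_test_stable C₀ S hC hS (d ++ "/")]
            rintro ⟨-, hex⟩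
            exact ht hex
          have hstep : (if PySem.Set.contains S d then S
              else
                let pfx := if d ≠ "" then d ++ "/" else ""
                if S.any (fun cd => decide (pfx ≠ "") && PySem.Str.startswith cd pfx) then
                  PySem.Set.add S d
                else S) = S := by
            simp only [hcont, Bool.false_eq_true, if_false, hd, ne_eq, not_false_iff, if_true, hany]
          rw [hstep, ih S hC hS y]
          constructor
          · rintro (hs | ⟨hK, hQ⟩)
            · exact Or.inl hs
            · exact Or.inr ⟨Or.inr hK, hQ⟩
          · rintro (hs | ⟨(rfl | hK), hne, hQ⟩)
            · exact Or.inl hs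
            · exact absurd hQ ht
            · exact Or.inr ⟨hK, hne, hQ⟩

-- filtering a nodup sorted list = sorting the filtered list
theorem pv_filter_sorted (xs : List String) (hnd : xs.Nodup) (p : String → Bool) :
    (PySem.List.sorted xs (fun x => x) false).filter p
      = PySem.List.sorted (xs.filter p) (fun x => x) false := by
  have hperm : ((PySem.List.sorted xs (fun x => x) false).filter p).Perm (xs.filter p) :=
    (PySem.List.sorted_perm xs (fun x => x) false).filter p
  have hnd' : (PySem.List.sorted xs (fun x => x) false).Nodup :=
    (PySem.List.sorted_perm xs (fun x => x) false).nodup_iff.mpr hnd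
  have hle : (PySem.List.sorted xs (fun x => x) false).Pairwise (fun a b => a ≤ b) :=
    PySem.List.sorted_pairwise xs (fun x => x)
  have hlt : (PySem.List.sorted xs (fun x => x) false).Pairwise (fun a b => a < b) :=
    (hle.and hnd').imp (fun h => lt_of_le_of_ne h.1 h.2)
  exact (PySem.List.sorted_eq_of_perm_of_pairwise_lt (xs.filter p) _ (fun x => x) hperm
    (hlt.sublist List.filter_sublist)).symm

-- keys / getD of the grouping folds
theorem pv_nrm_def (p : String) : PySem.Str.replace p "\\" "/" = pvNrm p := rfl
theorem pv_dir_def (n : String) : (pvRpartition n).1 = pvDir n := rfl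
theorem pv_file_def (n : String) : (pvRpartition n).2.2 = pvFile n := rfl
theorem pv_match_def (f : String) :
    (PySem.Str.startswith f "tl_" || PySem.Str.startswith f "tp_") = pvMatch f := rfl

theorem pv_keys_FB (paths : List String) :
    (pvFB paths).keys = PySem.Set.ofList (paths.map (fun p => pvDir (pvNrm p))) := by
  unfold pvFB
  rw [PySem.Dict.keys_foldl_modify_key paths (fun p => pvDir (pvNrm p)) []
      (fun _ p => fun l => l ++ [pvFile (pvNrm p)]) PySem.Dict.empty]
  rw [PySem.Dict.keys_empty, PySem.Set.update_nil_left]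

theorem pv_keys_G (paths : List String) :
    (pvGroups paths).keys = PySem.Set.ofList (paths.map (fun p => pvDir (pvNrm p))) := by
  unfold pvGroups
  rw [PySem.Dict.keys_foldl_modify_key paths (fun p => pvDir (pvNrm p)) []
      (fun _ p => fun l => l ++ [pvNrm p]) PySem.Dict.empty]
  rw [PySem.Dict.keys_empty, PySem.Set.update_nil_left]

theorem pv_keys_nodup (paths : List String) : (pvFB paths).keys.Nodup := by
  unfold pvFB
  exact PySem.Dict.nodup_keys_foldl_modify_key paths (fun p => pvDir (pvNrm p)) []
    (fun _ p => fun l => l ++ [pvFile (pvNrm p)]) PySem.Dict.empty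
    (by rw [PySem.Dict.keys_empty]; exact List.nodup_nil)

theorem pv_keys_nodup_G (paths : List String) : (pvGroups paths).keys.Nodup := by
  unfold pvGroups
  exact PySem.Dict.nodup_keys_foldl_modify_key paths (fun p => pvDir (pvNrm p)) []
    (fun _ p => fun l => l ++ [pvNrm p]) PySem.Dict.empty
    (by rw [PySem.Dict.keys_empty]; exact List.nodup_nil)

theorem pv_getD_FB (paths : List String) (x : String) :
    (pvFB paths).getD x []
      = (paths.filter (fun p => pvDir (pvNrm p) == x)).map (fun p => pvFile (pvNrm p)) := by
  unfold pvFB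
  have h : paths.foldl
        (fun g p => g.modify (pvDir (pvNrm p)) [] (fun l => l ++ [pvFile (pvNrm p)]))
        PySem.Dict.empty
      = (paths.map (fun p => (pvDir (pvNrm p), pvFile (pvNrm p)))).foldl
          (fun d q => d.modify q.1 [] (fun l => l ++ [q.2])) PySem.Dict.empty := by
    rw [List.foldl_map]
  rw [h, PySem.Dict.getD_foldl_modify_append, PySem.Dict.getD_empty]
  rw [List.filter_map, List.map_map]
  simp [Function.comp_def]

theorem pv_hasCode_getD (paths : List String) (x : String) :
    pvHasCodeFiles ((pvFB paths).getD x []) = true ↔ pvCond paths x := by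
  rw [pv_getD_FB]
  unfold pvHasCodeFiles pvCond
  rw [List.any_eq_true]
  constructor
  · rintro ⟨name, hname, hb⟩
    rw [List.mem_map] at hname
    obtain ⟨p, hpf, rfl⟩ := hname
    rw [List.mem_filter] at hpf
    obtain ⟨hp, hdx⟩ := hpf
    simp only [] at hb
    rw [pv_rsplit_noslash _ (pv_noslash_file _)] at hb
    exact ⟨p, hp, hb, by simpa using hdx⟩
  · rintro ⟨p, hp, hm, hdx⟩
    refine ⟨pvFile (pvNrm p), ?_, ?_⟩
    · rw [List.mem_map]
      exact ⟨p, List.mem_filter.mpr ⟨hp, by simpa using hdx⟩, rfl⟩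
    · simp only []
      rw [pv_rsplit_noslash _ (pv_noslash_file _)]
      exact hm

theorem pv_mem_C0 (paths : List String) (y : String) :
    y ∈ (pvFB paths).items.foldl
          (fun s p => if pvHasCodeFiles p.2 then PySem.Set.add s p.1 else s) PySem.Set.empty
      ↔ pvCond paths y := by
  rw [pv_mem_foldl_condAdd]
  constructor
  · rintro (hs | ⟨q, hq, hcode, rfl⟩)
    · simp [PySem.Set.empty] at hs
    · have hget : (pvFB paths).getD q.1 [] = q.2 :=
        PySem.Dict.getD_of_mem_items _ (by simpa using hq) (pv_keys_nodup paths) []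
    
      exact (pv_hasCode_getD paths q.1).mp (by rw [hget]; exact hcode)
  · intro hc
    right
    obtain ⟨p, hp, hm, hdx⟩ := hc
    have hkey : y ∈ (pvFB paths).keys := by
      rw [pv_keys_FB, PySem.Set.mem_ofList, List.mem_map]
      exact ⟨p, hp, hdx⟩
    have hitem : (y, (pvFB paths).getD y []) ∈ (pvFB paths).items := by
      rw [PySem.Dict.items_eq_map_keys _ (pv_keys_nodup paths) []]
      exact List.mem_map.mpr ⟨y, hkey, rfl⟩
    exact ⟨_, hitem, (pv_hasCode_getD paths y).mpr ⟨p, hp, hm, hdx⟩, rfl⟩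

theorem pv_mem_direct (paths : List String) (y : String) :
    y ∈ pvDirect paths ↔ pvCond paths y := by
  unfold pvDirect pvCond
  rw [pv_mem_foldl_condAdd]
  constructor
  · rintro (hs | ⟨p, hp, hm, rfl⟩)
    · simp [PySem.Set.empty] at hs
    · exact ⟨p, hp, hm, rfl⟩
  · rintro ⟨p, hp, hm, hdx⟩
    exact Or.inr ⟨p, hp, hm, hdx.symm⟩

theorem pv_slice_take (cd : String) (k : Nat) :
    PySem.Str.slice cd none (some ((0 : Int) + k)) = String.ofList (cd.toList.take k) := by
  unfold PySem.Str.slice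
  congr 1
  rw [PySem.Chars.slice_eq_listSlice, zero_add, PySem.List.slice_to _ (Int.natCast_nonneg k),
    Int.toNat_natCast]

theorem pv_codeB_mem (G : PySem.Dict String (List String)) (direct : PySem.Set String) (y : String) :
    (y ∈ direct.foldl
      (fun code cd =>
        (PySem.List.enumerate cd.toList 0).foldl
          (fun code ic =>
            if ic.2 == '/' then
              let anc := PySem.Str.slice cd none (some ic.1)
              if decide (anc ≠ "") && G.contains anc then PySem.Set.add code anc else code
            else code) code)
      (PySem.Set.ofList direct)
    ↔ y ∈ direct ∨ (y ≠ "" ∧ G.contains y = true ∧ ∃ cd ∈ direct, (y ++ "/").toList <+: cd.toList)) := by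
  rw [pv_mem_foldl_step direct _
      (fun cd z => z ≠ "" ∧ G.contains z = true ∧ (z ++ "/").toList <+: cd.toList) ?_ ]
  · rw [PySem.Set.mem_ofList]
    constructor
    · rintro (h | ⟨cd, hcd, hne, hcont, hpre⟩)
      · exact Or.inl h
      · exact Or.inr ⟨hne, hcont, cd, hcd, hpre⟩
    · rintro (h | ⟨hne, hcont, cd, hcd, hpre⟩)
      · exact Or.inl h
      · exact Or.inr ⟨cd, hcd, hne, hcont, hpre⟩
  · intro s cd z
    have hbody : (fun (code : PySem.Set String) (ic : Int × Char) =>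
        if ic.2 == '/' then
          let anc := PySem.Str.slice cd none (some ic.1)
          if decide (anc ≠ "") && G.contains anc then PySem.Set.add code anc else code
        else code)
      = (fun code ic =>
          if ((ic.2 == '/') && (decide ((PySem.Str.slice cd none (some ic.1)) ≠ "")
              && G.contains (PySem.Str.slice cd none (some ic.1)))) then
            PySem.Set.add code (PySem.Str.slice cd none (some ic.1))
          else code) := by
      funext code ic
      by_cases h1 : (ic.2 == '/') = true
      · simp [h1]
      · rw [Bool.not_eq_true] at h1
        simp [h1]
    rw [hbody, pv_mem_foldl_condAdd]
    constructor
    · rintro (hz | ⟨ic, hic, hc, rfl⟩)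
      · exact Or.inl hz
      · right
        rw [PySem.List.mem_enumerate_iff] at hic
        obtain ⟨k, hk, rfl⟩ := hic
        simp only [] at hc ⊢
        rw [Bool.and_eq_true, Bool.and_eq_true, beq_iff_eq, decide_eq_true_eq] at hc
        obtain ⟨hslash, hne, hcont⟩ := hc
        rw [pv_slice_take] at hne hcont ⊢
        refine ⟨hne, hcont, ?_⟩
        rw [pv_append_slash_toList, String.toList_ofList, pv_prefix_slash]
        exact ⟨k, hk, hslash, rfl⟩
    · rintro (hz | ⟨hne, hcont, hpre⟩)
      · exact Or.inl hz
      · right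
        rw [pv_append_slash_toList, pv_prefix_slash] at hpre
        obtain ⟨k, hk, hslash, htake⟩ := hpre
        have hz' : String.ofList (cd.toList.take k) = z := by
          rw [← htake, String.ofList_toList]
        refine ⟨((0 : Int) + k, cd.toList[k]), ?_, ?_, ?_⟩
        · rw [PySem.List.mem_enumerate_iff]
          exact ⟨k, hk, rfl⟩
        · simp only []
          rw [Bool.and_eq_true, Bool.and_eq_true, beq_iff_eq, decide_eq_true_eq, pv_slice_take]
          exact ⟨hslash, by rw [hz']; exact hne, by rw [hz']; exact hcont⟩
        · simp only []
          rw [pv_slice_take, hz']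

-- the two one-pass grouping folds, split into canonical components
theorem pv_A_state_aux (l : List String)
    (st0 : PySem.Dict String (List String) × PySem.Dict String (List String)) :
    l.foldl
      (fun (st : PySem.Dict String (List String) × PySem.Dict String (List String)) short_path =>
        let normalized := PySem.Str.replace short_path "\\" "/"
        let parts := pvRsplit1 normalized
        let df := if parts.length = 2 then (PySem.List.pyGetD parts 0 "", PySem.List.pyGetD parts 1 "")
                  else ("", PySem.List.pyGetD parts 0 "")
        (st.1.modify df.1 [] (fun l => l ++ [normalized]),
         st.2.modify df.1 [] (fun l => l ++ [df.2]))) st0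
    = (l.foldl (fun g p => g.modify (pvDir (pvNrm p)) [] (fun l => l ++ [pvNrm p])) st0.1,
       l.foldl (fun fb p => fb.modify (pvDir (pvNrm p)) [] (fun l => l ++ [pvFile (pvNrm p)])) st0.2) := by
  induction l generalizing st0 with
  | nil => rfl
  | cons p ps ih =>
    rw [List.foldl_cons, List.foldl_cons, List.foldl_cons, ih]
    simp only []
    rw [pv_df_eq]
    rfl

theorem pv_B_state_aux (l : List String)
    (st0 : PySem.Dict String (List String) × PySem.Set String) :
    l.foldl
      (fun (st : PySem.Dict String (List String) × PySem.Set String) p =>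
        let n := PySem.Str.replace p "\\" "/"
        let dpf := pvRpartition n
        (st.1.modify dpf.1 [] (fun l => l ++ [n]),
         if PySem.Str.startswith dpf.2.2 "tl_" || PySem.Str.startswith dpf.2.2 "tp_" then
           PySem.Set.add st.2 dpf.1
         else st.2)) st0
    = (l.foldl (fun g p => g.modify (pvDir (pvNrm p)) [] (fun l => l ++ [pvNrm p])) st0.1,
       l.foldl (fun s p => if pvMatch (pvFile (pvNrm p)) then PySem.Set.add s (pvDir (pvNrm p)) else s) st0.2) := by
  induction l generalizing st0 with
  | nil => rfl
  | cons p ps ih =>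
    rw [List.foldl_cons, List.foldl_cons, List.foldl_cons, ih]
    simp only []
    simp only [pv_dir_def, pv_file_def, pv_match_def, pv_nrm_def]

theorem pv_A_state (paths : List String) :
    paths.foldl
      (fun (st : PySem.Dict String (List String) × PySem.Dict String (List String)) short_path =>
        let normalized := PySem.Str.replace short_path "\\" "/"
        let parts := pvRsplit1 normalized
        let df := if parts.length = 2 then (PySem.List.pyGetD parts 0 "", PySem.List.pyGetD parts 1 "")
                  else ("", PySem.List.pyGetD parts 0 "")
        (st.1.modify df.1 [] (fun l => l ++ [normalized]),
         st.2.modify df.1 [] (fun l => l ++ [df.2]))) (PySem.Dict.empty, PySem.Dict.empty)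
    = (pvGroups paths, pvFB paths) :=
  pv_A_state_aux paths (PySem.Dict.empty, PySem.Dict.empty)

theorem pv_B_state (paths : List String) :
    paths.foldl
      (fun (st : PySem.Dict String (List String) × PySem.Set String) p =>
        let n := PySem.Str.replace p "\\" "/"
        let dpf := pvRpartition n
        (st.1.modify dpf.1 [] (fun l => l ++ [n]),
         if PySem.Str.startswith dpf.2.2 "tl_" || PySem.Str.startswith dpf.2.2 "tp_" then
           PySem.Set.add st.2 dpf.1
         else st.2)) (PySem.Dict.empty, PySem.Set.empty)
    = (pvGroups paths, pvDirect paths) :=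
  pv_B_state_aux paths (PySem.Dict.empty, PySem.Set.empty)

-- the two code-directory sets answer the same membership queries
theorem pv_code_eq (paths : List String) (y : String) :
    PySem.Set.contains
      ((pvFB paths).keys.foldl
        (fun code d =>
          if PySem.Set.contains code d then code
          else
            let pfx := if d ≠ "" then d ++ "/" else ""
            if code.any (fun cd => decide (pfx ≠ "") && PySem.Str.startswith cd pfx) then
              PySem.Set.add code d
            else code)
        ((pvFB paths).items.foldl
          (fun s p => if pvHasCodeFiles p.2 then PySem.Set.add s p.1 else s) PySem.Set.empty)) y
    = PySem.Set.contains
      ((pvDirect paths).foldl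
        (fun code cd =>
          (PySem.List.enumerate cd.toList 0).foldl
            (fun code ic =>
              if ic.2 == '/' then
                let anc := PySem.Str.slice cd none (some ic.1)
                if decide (anc ≠ "") && (pvGroups paths).contains anc then PySem.Set.add code anc
                else code
              else code) code)
        (PySem.Set.ofList (pvDirect paths))) y := by
  have hBool : ∀ a b : Bool, ((a = true) ↔ (b = true)) → a = b := by decide
  apply hBool
  rw [pv_contains_iff, pv_contains_iff]
  rw [pv_promo_mem ((pvFB paths).keys) _ _ (fun x h => h) (fun x h => Or.inl h) y]
  rw [pv_codeB_mem (pvGroups paths) (pvDirect paths) y]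
  simp only [pv_mem_C0, pv_mem_direct, pv_sw_iff, pv_append_slash_toList,
    PySem.Dict.contains_iff_mem_keys, pv_keys_G, pv_keys_FB]
  constructor
  · rintro (hc | ⟨hk, hne, cd, hcd, hpre⟩)
    · exact Or.inl hc
    · exact Or.inr ⟨hne, hk, cd, hcd, hpre⟩
  · rintro (hc | ⟨hne, hk, cd, hcd, hpre⟩)
    · exact Or.inl hc
    · exact Or.inr ⟨hk, hne, cd, hcd, hpre⟩

-- ===== VERDICT (by name: the statement is the Claim_ definition above) =====
theorem group_paths_by_directory_spec : Claim_equal_group_paths_by_directory := by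
  intro paths _
  unfold Spec_group_paths_by_directory group_paths_by_directory group_paths_by_directory_alt
  rw [pv_A_state, pv_B_state]
  simp only []
  rw [PySem.List.foldl_append_singleton_eq_map]
  simp only [List.nil_append]
  refine congrArg _ (congrArg _ ?_)
  unfold pvClassifyDirs
  simp only []
  simp only [pv_code_eq]
  rw [pv_filter_sorted _ (pv_keys_nodup_G paths), pv_filter_sorted _ (pv_keys_nodup_G paths)]
  rw [pv_keys_G, pv_keys_FB]
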